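-- pv_equiv track=rewrite | github.com/gragtah/COSC-302-Algorithms-labs | lab5RagtahGreedyAlgorithms.py | strdist
-- ===== SOURCE A (Python) =====
-- def strdist(s1, s2):
--     s = {}
--     #s1 = s1.lower()
--     #s2 = s2.lower()
--     for c in s1:
--         try:
--             x=(int)(s[c].pop())
--             s[c].append(x+1)
--         except KeyError:
--             s[c] = [1]
--
--     ctr = 0
--     for c in s2:
--         try:
--             x = s[c].pop()
--             ctr+=1
--             if (x==1):
--                 del (s[c])
--             else:
--                 s[c].append(x-1)
--         except KeyError:
--             blah = 0
--     return ctr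
-- ===== SOURCE B (Python) =====
-- def strdist(s1, s2):
--     cs1 = list(s1)
--     cs2 = list(s2)
--     ctr = 0
--     for c in set(cs1):
--         ctr += min(cs1.count(c), cs2.count(c))
--     return ctr
-- ===== Notes on version B (the rewrite author's own statement) =====
-- stated objective: simpler
-- what changed: Replaced the mutable dict-of-singleton-lists with pop/append/del bookkeeping over two passes by a direct sum of min(s1.count(c), s2.count(c)) over the distinct characters of s1.
import Mathlib
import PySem

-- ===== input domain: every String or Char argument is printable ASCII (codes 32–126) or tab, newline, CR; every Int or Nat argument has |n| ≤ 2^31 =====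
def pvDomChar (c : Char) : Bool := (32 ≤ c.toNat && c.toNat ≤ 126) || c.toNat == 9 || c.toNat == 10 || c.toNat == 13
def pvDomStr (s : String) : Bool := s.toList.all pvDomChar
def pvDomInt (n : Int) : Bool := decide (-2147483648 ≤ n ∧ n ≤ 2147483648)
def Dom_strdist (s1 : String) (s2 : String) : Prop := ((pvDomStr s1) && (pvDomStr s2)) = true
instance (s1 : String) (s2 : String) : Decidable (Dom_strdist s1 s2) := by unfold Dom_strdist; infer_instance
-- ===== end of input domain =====

-- B replaces A's mutable dict-of-singleton-lists bookkeeping (pop/append/del over two passes)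
-- by a direct sum of min(count in s1, count in s2) over the distinct characters of s1 (objective: simpler).

-- ===== PORT A =====
-- for c in s1: try x = int(s[c].pop()); s[c].append(x+1) except KeyError: s[c] = [1]
def strdistStep1 (d : PySem.Dict Char (List Int)) (c : Char) : PySem.Dict Char (List Int) :=
  match d.get? c with
  | none => d.insert c [1]                       -- KeyError branch: s[c] = [1]
  | some l =>
    match PySem.List.pop? l (-1) with
    | none => d                                  -- unreachable: stored lists are never empty
    | some (x, rest) => d.insert c (rest ++ [x + 1])

-- for c in s2: try x = s[c].pop(); ctr += 1; if x == 1: del s[c] else s[c].append(x-1)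
def strdistStep2 (st : PySem.Dict Char (List Int) × Int) (c : Char) :
    PySem.Dict Char (List Int) × Int :=
  match st.1.get? c with
  | none => st                                   -- KeyError branch: blah = 0
  | some l =>
    match PySem.List.pop? l (-1) with
    | none => st                                 -- unreachable: stored lists are never empty
    | some (x, rest) =>
      let d' := st.1.insert c rest               -- the pop mutated the list stored at c
      if x == 1 then (d'.erase c, st.2 + 1) else (d'.insert c (rest ++ [x - 1]), st.2 + 1)

def strdist (s1 : String) (s2 : String) : Int :=
  let s := s1.toList.foldl strdistStep1 PySem.Dict.empty
  (s2.toList.foldl strdistStep2 (s, 0)).2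

-- ===== PORT B =====
def strdist_alt (s1 : String) (s2 : String) : Int :=
  let cs1 := s1.toList
  let cs2 := s2.toList
  (PySem.Set.ofList cs1).foldl
    (fun ctr c => ctr + ((min (PySem.List.count cs1 c) (PySem.List.count cs2 c) : Nat) : Int)) 0

-- ===== PRECONDITION & SPEC =====
def Spec_strdist (s1 : String) (s2 : String) (out : Int) : Prop := out = strdist_alt s1 s2
instance (s1 : String) (s2 : String) (out : Int) : Decidable (Spec_strdist s1 s2 out) := by unfold Spec_strdist; infer_instance

-- ===== CLAIM (what is proved, stated in full; the proofs are below) =====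
def Claim_equal_strdist : Prop := ∀ (s1 : String) (s2 : String), Dom_strdist s1 s2 → Spec_strdist s1 s2 (strdist s1 s2)

-- ===== LEMMAS AND PROOFS =====

-- `d` represents the count function `f`: each character with positive count is stored as the
-- singleton list [count]; characters with count 0 are absent.
def RepCnt (d : PySem.Dict Char (List Int)) (f : Char → Nat) : Prop :=
  ∀ c, d.get? c = if f c = 0 then none else some [((f c : Nat) : Int)]

-- abstract content of A's second loop: consume l against remaining capacities f
def Rcnt (f : Char → Nat) : List Char → Nat
  | [] => 0
  | c :: rest => (if 0 < f c then 1 else 0) + Rcnt (fun x => if x = c then f x - 1 else f x) rest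

theorem get?_erase_helper (d : PySem.Dict Char (List Int)) (k x : Char) :
    (d.erase k).get? x = if x = k then none else d.get? x := by
  obtain ⟨items⟩ := d
  simp only [PySem.Dict.erase, PySem.Dict.get?]
  induction items with
  | nil => simp
  | cons p rest ih =>
    by_cases hpk : p.1 = k <;> by_cases hpx : p.1 = x <;> by_cases hxk : x = k <;>
      simp_all [beq_iff_eq]

theorem repCnt_step1 (d : PySem.Dict Char (List Int)) (f : Char → Nat) (c : Char)
    (h : RepCnt d f) : RepCnt (strdistStep1 d c) (fun x => if x = c then f x + 1 else f x) := by
  intro x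
  have hc := h c
  by_cases h0 : f c = 0
  · rw [h0] at hc; simp at hc
    simp only [strdistStep1, hc]
    by_cases hx : x = c
    · subst hx; rw [PySem.Dict.get?_insert_self]; simp [h0]
    · rw [PySem.Dict.get?_insert_of_ne _ _ hx, h x]; simp [hx]
  · rw [if_neg h0] at hc
    have hpop : PySem.List.pop? [((f c : Nat) : Int)] (-1) = some (((f c : Nat) : Int), []) :=
      PySem.List.pop?_last [] _
    simp only [strdistStep1, hc, hpop]
    by_cases hx : x = c
    · subst hx; rw [PySem.Dict.get?_insert_self]; simp
    · rw [PySem.Dict.get?_insert_of_ne _ _ hx, h x]; simp [hx]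

theorem repCnt_loop1 (l : List Char) (d : PySem.Dict Char (List Int)) (f : Char → Nat)
    (h : RepCnt d f) : RepCnt (l.foldl strdistStep1 d) (fun x => f x + l.count x) := by
  induction l generalizing d f with
  | nil => simpa using h
  | cons c rest ih =>
    rw [List.foldl_cons]
    have := ih (strdistStep1 d c) _ (repCnt_step1 d f c h)
    have hfun : (fun x => (if x = c then f x + 1 else f x) + rest.count x) =
        (fun x => f x + (c :: rest).count x) := by
      funext x; rw [List.count_cons]
      by_cases hx : x = c
      · subst hx; simp; omega
      · rw [if_neg hx, if_neg (fun h => hx (beq_iff_eq.mp h).symm)]; omega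
    rwa [hfun] at this

theorem loop2_eq_Rcnt (l : List Char) (d : PySem.Dict Char (List Int)) (f : Char → Nat)
    (ctr : Int) (h : RepCnt d f) :
    (l.foldl strdistStep2 (d, ctr)).2 = ctr + (Rcnt f l : Int) := by
  induction l generalizing d f ctr with
  | nil => simp [Rcnt]
  | cons c rest ih =>
    have hc := h c
    rw [List.foldl_cons]
    by_cases h0 : f c = 0
    · rw [if_pos h0] at hc
      have hstep : strdistStep2 (d, ctr) c = (d, ctr) := by
        simp [strdistStep2, hc]
      rw [hstep, ih d f ctr h]
      have hf : (fun x => if x = c then f x - 1 else f x) = f := by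
        funext x; by_cases hx : x = c <;> simp [hx]; omega
      simp [Rcnt, h0, hf]
    · rw [if_neg h0] at hc
      set f' : Char → Nat := fun x => if x = c then f x - 1 else f x with hf'
      by_cases h1 : f c = 1
      · have hc1 : d.get? c = some [1] := by rw [hc]; norm_num [h1]
        have hpop1 : PySem.List.pop? [(1:Int)] (-1) = some (1, []) := PySem.List.pop?_last [] 1
        have hstep : strdistStep2 (d, ctr) c = ((d.insert c []).erase c, ctr + 1) := by
          simp [strdistStep2, hc1, hpop1]
        rw [hstep]
        have hrep : RepCnt ((d.insert c []).erase c) f' := by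
          intro x
          rw [get?_erase_helper]
          by_cases hx : x = c
          · simp [hx, hf', h1]
          · rw [if_neg hx, PySem.Dict.get?_insert_of_ne _ _ hx, h x]
            simp [hf', hx]
        rw [ih _ _ _ hrep]
        simp [Rcnt, Nat.pos_of_ne_zero h0]
        ring
      · have hpop : PySem.List.pop? [((f c : Nat) : Int)] (-1) = some (((f c : Nat) : Int), []) :=
          PySem.List.pop?_last [] _
        have hne1 : (((f c : Nat) : Int) == 1) = false := by
          simp; omega
        have hstep : strdistStep2 (d, ctr) c =
            ((d.insert c []).insert c ([] ++ [((f c : Nat) : Int) - 1]), ctr + 1) := by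
          simp [strdistStep2, hc, hpop, hne1]
        rw [hstep]
        have hrep : RepCnt ((d.insert c []).insert c ([] ++ [((f c : Nat) : Int) - 1])) f' := by
          intro x
          by_cases hx : x = c
          · subst hx; rw [PySem.Dict.get?_insert_self]
            have : f' x = f x - 1 := by simp [hf']
            rw [this, if_neg (by omega)]
            congr 1; simp; push_cast [Nat.cast_sub (by omega : 1 ≤ f x)]; ring
          · rw [PySem.Dict.get?_insert_of_ne _ _ hx, PySem.Dict.get?_insert_of_ne _ _ hx, h x]
            simp [hf', hx]
        rw [ih _ _ _ hrep]
        simp [Rcnt, Nat.pos_of_ne_zero h0]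
        ring

theorem sum_map_succ_at {S : List Char} {c : Char} (g g' : Char → Nat)
    (hnd : S.Nodup) (hc : c ∈ S) (hgc : g c = g' c + 1)
    (hne : ∀ x ∈ S, x ≠ c → g x = g' x) :
    (S.map g).sum = (S.map g').sum + 1 := by
  induction S with
  | nil => simp at hc
  | cons a S ih =>
    simp only [List.map_cons, List.sum_cons]
    rcases List.mem_cons.mp hc with rfl | hcS
    · have : ∀ x ∈ S, g x = g' x := fun x hx =>
        hne x (List.mem_cons_of_mem _ hx) (fun h => (List.nodup_cons.mp hnd).1 (h ▸ hx))
      rw [List.map_congr_left this, hgc]; ring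
    · have hac : a ≠ c := fun h => (List.nodup_cons.mp hnd).1 (h ▸ hcS)
      rw [ih (List.nodup_cons.mp hnd).2 hcS
            (fun x hx hxc => hne x (List.mem_cons_of_mem _ hx) hxc),
          hne a (List.mem_cons_self) hac]
      ring

theorem Rcnt_eq_sum (l : List Char) (f : Char → Nat) (S : List Char)
    (hnd : S.Nodup) (hsupp : ∀ c, 0 < f c → c ∈ S) :
    Rcnt f l = (S.map (fun c => min (f c) (l.count c))).sum := by
  induction l generalizing f with
  | nil =>
    simp [Rcnt]
  | cons c rest ih =>
    by_cases h0 : f c = 0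
    · have hf : (fun x => if x = c then f x - 1 else f x) = f := by
        funext x; by_cases hx : x = c <;> simp [hx]; omega
      rw [Rcnt, hf, if_neg (by omega), ih f hsupp]
      simp only [Nat.zero_add]
      apply congrArg
      apply List.map_congr_left
      intro x hx
      by_cases hxc : x = c
      · subst hxc; simp [h0]
      · rw [List.count_cons, if_neg (fun h => hxc (beq_iff_eq.mp h).symm), Nat.add_zero]
    · set f' : Char → Nat := fun x => if x = c then f x - 1 else f x with hf'
      have hsupp' : ∀ x, 0 < f' x → x ∈ S := by
        intro x hx; apply hsupp; by_cases hxc : x = c <;> simp_all; omega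
      rw [Rcnt, if_pos (by omega), ih f' hsupp']
      rw [Nat.add_comm]
      refine (sum_map_succ_at _ _ hnd (hsupp c (by omega)) ?_ ?_).symm
      · simp [hf']; omega
      · intro x hx hxc
        rw [List.count_cons, if_neg (fun h => hxc (beq_iff_eq.mp h).symm), Nat.add_zero]
        simp [hf', hxc]

theorem foldl_add_cast_min (S : List Char) (g : Char → Nat) (a : Int) :
    S.foldl (fun ctr c => ctr + ((g c : Nat) : Int)) a = a + ((S.map g).sum : Nat) := by
  induction S generalizing a with
  | nil => simp
  | cons c S ih => simp [ih]; ring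

-- ===== VERDICT (by name: the statement is the Claim_ definition above) =====
theorem strdist_spec : Claim_equal_strdist := by
  intro s1 s2 _
  unfold Spec_strdist strdist strdist_alt
  have hrep0 : RepCnt PySem.Dict.empty (fun _ => 0) := by
    intro c; simp [PySem.Dict.get?, PySem.Dict.empty]
  have hrep := repCnt_loop1 s1.toList _ _ hrep0
  have hcount : (fun x => (0 : Nat) + s1.toList.count x) = fun x => s1.toList.count x := by
    funext x; omega
  rw [hcount] at hrep
  rw [loop2_eq_Rcnt s2.toList _ _ 0 hrep,
      Rcnt_eq_sum s2.toList _ (PySem.Set.ofList s1.toList) (PySem.Set.nodup_ofList _)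
        (fun c hc => (PySem.Set.mem_ofList _ _).mpr (List.count_pos_iff.mp hc))]
  simp only [PySem.List.count_eq, foldl_add_cast_min]
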